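-- pv_equiv track=rewrite | github.com/Ankush12852/fonus | backend/main.py | is_note_request
-- ===== SOURCE A (Python) =====
-- NOTE_TRIGGER_WORDS = [
--     "create note", "make note", "write note",
--     "detailed note", "revision note", "study note",
--     "revise", "recap", "summarise", "summarize",
--     "give me a summary", "quick summary",
--     "prepare me", "help me revise", "revision material",
--     "key points", "important points", "cheat sheet"
-- ]
--
-- def is_note_request(question: str) -> bool:
--     q = question.lower().strip()
--     # Direct match
--     if any(trigger in q for trigger in NOTE_TRIGGER_WORDS):
--         return True
--     # Common misspellings and variants
--     note_variants = [
--         "summery", "sumary", "summar", "notee", "nots",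
--         "breif", "breaf", "bref", "overvew", "overviw",
--         "recape", "recaap", "revise", "revsion", "revcap"
--     ]
--     return any(variant in q for variant in note_variants)
-- ===== SOURCE B (Python) =====
-- import re
--
-- # All trigger words and misspelling variants merged into one joined
-- # alternation, compiled once (all literals; no regex metacharacters occur,
-- # so no escaping is needed).
-- _PATTERN_SRC = (
--     "create note|make note|write note|detailed note|revision note|study note|"
--     "revise|recap|summarise|summarize|give me a summary|quick summary|"
--     "prepare me|help me revise|revision material|key points|important points|"
--     "cheat sheet|"
--     "summery|sumary|summar|notee|nots|breif|breaf|bref|overvew|overviw|"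
--     "recape|recaap|revise|revsion|revcap"
-- )
-- _PATTERN = re.compile(_PATTERN_SRC)
--
-- def is_note_request(question: str) -> bool:
--     q = question.lower().strip()
--     return _PATTERN.search(q) is not None
-- ===== Notes on version B (the rewrite author's own statement) =====
-- stated objective: idiomatic
-- what changed: B merges the trigger words and misspelling variants into one precompiled regex alternation of plain word literals and answers with a single PATTERN.search scan of the lowered/stripped text, instead of A's two explicit any-loops running a separate substring search per word.
import Mathlib
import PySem

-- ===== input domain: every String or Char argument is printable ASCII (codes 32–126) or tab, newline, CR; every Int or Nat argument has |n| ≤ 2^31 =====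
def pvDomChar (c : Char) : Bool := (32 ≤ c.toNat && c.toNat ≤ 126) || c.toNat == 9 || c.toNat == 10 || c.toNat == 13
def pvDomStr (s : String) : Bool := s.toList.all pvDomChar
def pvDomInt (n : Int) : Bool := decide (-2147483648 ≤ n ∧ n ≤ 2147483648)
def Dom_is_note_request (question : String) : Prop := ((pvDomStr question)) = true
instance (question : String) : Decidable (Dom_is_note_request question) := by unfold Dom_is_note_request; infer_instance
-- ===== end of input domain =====

-- B replaces A's two per-word substring loops by one merged '|'-joined pattern scanned left-to-right once over the text (idiomatic).


-- ===== PORT A =====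
def NOTE_TRIGGER_WORDS : List String := [
  "create note", "make note", "write note",
  "detailed note", "revision note", "study note",
  "revise", "recap", "summarise", "summarize",
  "give me a summary", "quick summary",
  "prepare me", "help me revise", "revision material",
  "key points", "important points", "cheat sheet"]

def noteVariants : List String := [
  "summery", "sumary", "summar", "notee", "nots",
  "breif", "breaf", "bref", "overvew", "overviw",
  "recape", "recaap", "revise", "revsion", "revcap"]

def is_note_request (question : String) : Bool :=
  let q := PySem.Str.strip (PySem.Str.lower question)
  if NOTE_TRIGGER_WORDS.any (fun trigger => PySem.Str.isIn trigger q) then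
    true
  else
    noteVariants.any (fun variant => PySem.Str.isIn variant q)

-- ===== PORT B =====
-- The single '|'-joined pattern source (a literal alternation; no metacharacters occur).
def pvPatternSrc : String :=
  "create note|make note|write note|detailed note|revision note|study note|" ++
  "revise|recap|summarise|summarize|give me a summary|quick summary|" ++
  "prepare me|help me revise|revision material|key points|important points|" ++
  "cheat sheet|" ++
  "summery|sumary|summar|notee|nots|breif|breaf|bref|overvew|overviw|" ++
  "recape|recaap|revise|revsion|revcap"

-- 'Compiling' the alternation of literals = its list of alternatives, split at the separator.
def pvAlternatives : List (List Char) :=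
  PySem.Chars.splitOn pvPatternSrc.toList ['|']

-- The regex engine's left-to-right scan: at each position try every alternative as a
-- prefix, otherwise advance one character. Exact for a literal alternation (PATTERN.search).
def pvScan (alts : List (List Char)) : List Char → Bool
  | [] => alts.any (fun w => w.isPrefixOf [])
  | c :: rest =>
    if alts.any (fun w => w.isPrefixOf (c :: rest)) then true
    else pvScan alts rest

def is_note_request_alt (question : String) : Bool :=
  let q := PySem.Str.strip (PySem.Str.lower question)
  pvScan pvAlternatives q.toList

-- ===== PRECONDITION & SPEC =====
def Spec_is_note_request (question : String) (out : Bool) : Prop := out = is_note_request_alt question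
instance (question : String) (out : Bool) : Decidable (Spec_is_note_request question out) := by unfold Spec_is_note_request; infer_instance

-- ===== CLAIM (what is proved, stated in full; the proofs are below) =====
def Claim_equal_is_note_request : Prop := ∀ (question : String), Dom_is_note_request question → Spec_is_note_request question (is_note_request question)

-- ===== LEMMAS AND PROOFS =====

theorem pvScan_eq_true_iff (alts : List (List Char)) (s : List Char) :
    pvScan alts s = true ↔ ∃ w ∈ alts, ∃ j, w <+: s.drop j := by
  induction s with
  | nil =>
    simp only [pvScan]
    constructor
    · intro h
      rw [List.any_eq_true] at h
      obtain ⟨w, hw, hp⟩ := h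
      exact ⟨w, hw, 0, by simpa using hp⟩
    · rintro ⟨w, hw, j, hp⟩
      rw [List.any_eq_true]
      exact ⟨w, hw, by simpa using hp⟩
  | cons c rest ih =>
    simp only [pvScan]
    split_ifs with h
    · simp only [true_iff]
      rw [List.any_eq_true] at h
      obtain ⟨w, hw, hp⟩ := h
      exact ⟨w, hw, 0, by simpa using hp⟩
    · rw [ih]
      constructor
      · rintro ⟨w, hw, j, hp⟩
        exact ⟨w, hw, j + 1, by simpa using hp⟩
      · rintro ⟨w, hw, j, hp⟩
        cases j with
        | zero =>
          exfalso
          exact h (List.any_eq_true.mpr ⟨w, hw, by simpa using hp⟩)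
        | succ j => exact ⟨w, hw, j, by simpa using hp⟩

theorem pvScan_eq_any_isIn (alts : List (List Char)) (s : List Char) :
    pvScan alts s = alts.any (fun w => PySem.Chars.isIn w s) := by
  by_cases h : pvScan alts s = true
  · rw [h]
    symm
    rw [List.any_eq_true]
    obtain ⟨w, hw, j, hp⟩ := (pvScan_eq_true_iff alts s).mp h
    exact ⟨w, hw, (PySem.Chars.exists_prefix_drop_iff_isIn (s := s) (sub := w)).mp ⟨j, hp⟩⟩
  · rw [Bool.not_eq_true] at h
    rw [h]
    symm
    rw [Bool.eq_false_iff]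
    intro hc
    rw [List.any_eq_true] at hc
    obtain ⟨w, hw, hin⟩ := hc
    obtain ⟨j, hp⟩ := (PySem.Chars.exists_prefix_drop_iff_isIn (s := s) (sub := w)).mpr hin
    exact absurd ((pvScan_eq_true_iff alts s).mpr ⟨w, hw, j, hp⟩) (by simp [h])

-- splitting the pattern source recovers exactly A's two word lists, in order
set_option maxRecDepth 100000 in
theorem pvAlternatives_eq :
    pvAlternatives = (NOTE_TRIGGER_WORDS ++ noteVariants).map String.toList := by
  decide

-- ===== VERDICT (by name: the statement is the Claim_ definition above) =====
theorem is_note_request_spec : Claim_equal_is_note_request := by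
  intro question _
  unfold Spec_is_note_request is_note_request is_note_request_alt
  simp only [pvScan_eq_any_isIn, pvAlternatives_eq, List.map_append, List.any_append,
    List.any_map, Function.comp_def, PySem.Str.isIn_eq, PySem.Str.toList_strip,
    PySem.Str.toList_lower]
  split_ifs with h
  · simp [h]
  · rw [Bool.not_eq_true] at h
    simp [h]
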